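-- pv_equiv track=rewrite | github.com/MatheusOliveira2/Trabalho-Teoria | uh.py | decodificaEntrada
-- ===== SOURCE A (Python) =====
-- def decodificaEntrada(entrada):
--     maquina = []
--     palavra = []
--     flagFimMaquina = False
--     countZero = 0
--     for i in range(len(entrada)):
--         if(not flagFimMaquina):
--             if(entrada[i] != "\n"):
--                 maquina.append(entrada[i])
--                 if(entrada[i] == '0'):
--                     countZero = countZero + 1
--                 else:
--                     countZero = 3
--                 if(countZero == 6):
--                     flagFimMaquina = True
--         else:
--             if(entrada[i] != "\n"):
--                 palavra.append(entrada[i])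
--
--     return maquina,palavra
-- ===== SOURCE B (Python) =====
-- def decodificaEntrada(entrada):
--     # Phase 1: find the index of the character that trips the zero counter (inclusive in maquina).
--     idx = None
--     count = 0
--     for i in range(len(entrada)):
--         c = entrada[i]
--         if c != "\n":
--             count = count + 1 if c == '0' else 3
--             if count == 6:
--                 idx = i
--                 break
--     # Phase 2: filter newlines out of the two regions.
--     if idx is None:
--         return [c for c in entrada if c != "\n"], []
--     return ([c for c in entrada[:idx + 1] if c != "\n"],
--             [c for c in entrada[idx + 1:] if c != "\n"])
-- ===== Notes on version B (the rewrite author's own statement) =====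
-- stated objective: simpler
-- what changed: Replaces A's single interleaved loop with mutable flag and two accumulators by a two-phase decomposition: first scan only for the counter-tripping boundary index, then build maquina and palavra as two newline-filtering comprehensions over the slices before/after it.
import Mathlib
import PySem

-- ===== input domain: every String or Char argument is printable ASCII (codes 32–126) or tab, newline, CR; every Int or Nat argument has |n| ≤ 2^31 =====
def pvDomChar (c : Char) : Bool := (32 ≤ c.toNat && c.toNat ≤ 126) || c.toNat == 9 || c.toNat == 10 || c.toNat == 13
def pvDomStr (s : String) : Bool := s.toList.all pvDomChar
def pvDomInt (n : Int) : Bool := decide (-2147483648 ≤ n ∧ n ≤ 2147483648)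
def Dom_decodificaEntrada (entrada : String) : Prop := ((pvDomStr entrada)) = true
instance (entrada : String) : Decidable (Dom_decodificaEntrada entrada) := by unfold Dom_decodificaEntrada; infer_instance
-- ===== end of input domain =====

-- B replaces A's single interleaved flag-loop by find-the-boundary-then-filter-two-regions (objective: simpler decomposition, same cost).

-- ===== PORT A =====
-- A's for-loop over entrada with state (maquina, palavra, flagFimMaquina, countZero), as structural recursion.
def pvLoopA : List Char → List String → List String → Bool → Int → List String × List String
  | [], m, p, _, _ => (m, p)
  | c :: cs, m, p, flag, cnt =>
    if flag = false then
      if c ≠ '\n' then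
        let m' := m ++ [String.ofList [c]]
        let cnt' := if c = '0' then cnt + 1 else 3
        if cnt' = 6 then pvLoopA cs m' p true cnt'
        else pvLoopA cs m' p false cnt'
      else pvLoopA cs m p flag cnt
    else
      if c ≠ '\n' then pvLoopA cs m (p ++ [String.ofList [c]]) flag cnt
      else pvLoopA cs m p flag cnt

def decodificaEntrada (entrada : String) : List String × List String :=
  pvLoopA entrada.toList [] [] false 0

-- ===== PORT B =====
-- Source B's phase 1: scan for the index of the tripping character (enumerate index i).
def pvFindSplit : List Char → Int → Nat → Option Nat
  | [], _, _ => none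
  | c :: cs, cnt, i =>
    if c ≠ '\n' then
      let cnt' := if c = '0' then cnt + 1 else 3
      if cnt' = 6 then some i else pvFindSplit cs cnt' (i + 1)
    else pvFindSplit cs cnt (i + 1)

-- Source B's phase 2: slices entrada[:idx+1] / entrada[idx+1:] with idx ≥ 0 are exactly take/drop.
def decodificaEntrada_alt (entrada : String) : List String × List String :=
  let cs := entrada.toList
  match pvFindSplit cs 0 0 with
  | none => (((cs.filter (· ≠ '\n')).map (fun c => String.ofList [c])), [])
  | some idx =>
      (((cs.take (idx + 1)).filter (· ≠ '\n')).map (fun c => String.ofList [c]),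
       ((cs.drop (idx + 1)).filter (· ≠ '\n')).map (fun c => String.ofList [c]))

-- ===== PRECONDITION & SPEC =====
def Spec_decodificaEntrada (entrada : String) (out : List String × List String) : Prop := out = decodificaEntrada_alt entrada
instance (entrada : String) (out : List String × List String) : Decidable (Spec_decodificaEntrada entrada out) := by unfold Spec_decodificaEntrada; infer_instance

-- ===== CLAIM (what is proved, stated in full; the proofs are below) =====
def Claim_equal_decodificaEntrada : Prop := ∀ (entrada : String), Dom_decodificaEntrada entrada → Spec_decodificaEntrada entrada (decodificaEntrada entrada)

-- ===== LEMMAS AND PROOFS =====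

-- After the flag trips, A just appends every non-newline char to palavra.
theorem pvLoopA_true (cs : List Char) : ∀ (m p : List String) (cnt : Int),
    pvLoopA cs m p true cnt = (m, p ++ (cs.filter (· ≠ '\n')).map (fun c => String.ofList [c])) := by
  induction cs with
  | nil => intro m p cnt; simp [pvLoopA]
  | cons c cs ih =>
    intro m p cnt
    by_cases h : c = '\n' <;> simp [pvLoopA, h, ih, List.filter]

-- The enumerate index only shifts the result.
theorem pvFindSplit_shift (cs : List Char) : ∀ (cnt : Int) (i : Nat),
    pvFindSplit cs cnt i = (pvFindSplit cs cnt 0).map (· + i) := by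
  induction cs with
  | nil => intro cnt i; simp [pvFindSplit]
  | cons c cs ih =>
    intro cnt i
    by_cases h : c = '\n'
    · subst h
      simp only [pvFindSplit, ne_eq, not_true_eq_false, if_false]
      rw [ih cnt (i + 1), ih cnt 1]
      cases pvFindSplit cs cnt 0 with
      | none => simp
      | some x => simp; omega
    · simp only [pvFindSplit, ne_eq, h, not_false_eq_true, if_true]
      by_cases h6 : (if c = '0' then cnt + 1 else 3) = 6
      · simp [h6]
      · simp only [if_neg h6]
        rw [ih _ (i + 1), ih _ 1]
        cases pvFindSplit cs (if c = '0' then cnt + 1 else 3) 0 with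
        | none => simp
        | some x => simp; omega

-- Main invariant: A's not-yet-tripped loop equals B's boundary search + two filters.
theorem pvLoopA_false (cs : List Char) : ∀ (m p : List String) (cnt : Int),
    pvLoopA cs m p false cnt =
      match pvFindSplit cs cnt 0 with
      | none => (m ++ (cs.filter (· ≠ '\n')).map (fun c => String.ofList [c]), p)
      | some idx =>
          (m ++ ((cs.take (idx + 1)).filter (· ≠ '\n')).map (fun c => String.ofList [c]),
           p ++ ((cs.drop (idx + 1)).filter (· ≠ '\n')).map (fun c => String.ofList [c])) := by
  induction cs with
  | nil => intro m p cnt; simp [pvLoopA, pvFindSplit]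
  | cons c cs ih =>
    intro m p cnt
    by_cases h : c = '\n'
    · subst h
      simp only [pvLoopA, pvFindSplit, ne_eq, not_true_eq_false, if_false]
      rw [ih m p cnt, pvFindSplit_shift cs cnt 1]
      cases hf : pvFindSplit cs cnt 0 with
      | none => simp [List.filter]
      | some idx => simp [List.take_succ_cons, List.drop_succ_cons]
    · simp only [pvLoopA, pvFindSplit, ne_eq, h, not_false_eq_true, if_true]
      by_cases h6 : (if c = '0' then cnt + 1 else 3) = 6
      · simp only [if_pos h6]
        rw [pvLoopA_true]
        simp [List.filter, h]
      · simp only [if_neg h6]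
        rw [ih _ p _, pvFindSplit_shift cs _ 1]
        cases hf : pvFindSplit cs (if c = '0' then cnt + 1 else 3) 0 with
        | none => simp [List.filter, h]
        | some idx => simp [h, List.take_succ_cons, List.drop_succ_cons]

-- ===== VERDICT (by name: the statement is the Claim_ definition above) =====
theorem decodificaEntrada_spec : Claim_equal_decodificaEntrada := by
  intro entrada _
  unfold Spec_decodificaEntrada decodificaEntrada decodificaEntrada_alt
  rw [pvLoopA_false]
  cases hf : pvFindSplit entrada.toList 0 0 <;> simp [hf]
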